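-- pv_equiv track=rewrite | github.com/GrantMatejka/AdventOfCode_2022 | 14/sol.py | build_grid2
-- ===== SOURCE A (Python) =====
-- def build_grid2(paths):
--     maxY = max(sum([[point[1] for point in path] for path in paths], [])) + 2
--     normalized_paths = [[[point[1], point[0]] for point in path] for path in paths]
--
--     blockers = set()
--
--     for path in normalized_paths:
--         starting_point = path[0]
--         for idx in range(1, len(path)):
--             next_point = path[idx]
--
--             deltaRow = next_point[0] - starting_point[0]
--             deltaCol = next_point[1] - starting_point[1]
--
--             while not starting_point == next_point:
--                 blockers.add(tuple(starting_point))
--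
--                 if not starting_point[0] == next_point[0]:
--                     dir = int(deltaRow / abs(deltaRow))
--                     starting_point[0] += dir
--
--                 if not starting_point[1] == next_point[1]:
--                     dir = int(deltaCol / abs(deltaCol))
--                     starting_point[1] += dir
--
--             blockers.add(tuple(starting_point))
--             starting_point = path[idx]
--
--     return (blockers, maxY)
-- ===== SOURCE B (Python) =====
-- def build_grid2(paths):
--     maxY = max(p[1] for path in paths for p in path) + 2
--     blockers = set()
--     for path in paths:
--         for a, b in zip(path, path[1:]):
--             r0, c0, r1, c1 = a[1], a[0], b[1], b[0]
--             sr = 1 if r1 >= r0 else -1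
--             sc = 1 if c1 >= c0 else -1
--             m = min(abs(r1 - r0), abs(c1 - c0))
--             # diagonal prefix of the segment
--             blockers.update(zip(range(r0, r0 + sr * (m + 1), sr),
--                                 range(c0, c0 + sc * (m + 1), sc)))
--             # axis-aligned remainder along the longer axis
--             rd, cd = r0 + sr * m, c0 + sc * m
--             blockers.update((r, cd) for r in range(rd, r1 + sr, sr))
--             blockers.update((rd, c) for c in range(cd, c1 + sc, sc))
--     return (blockers, maxY)
-- ===== Notes on version B (the rewrite author's own statement) =====
-- stated objective: alternative
-- what changed: A rasterises each segment with a mutating per-cell while-walk that re-tests both coordinates and recomputes the step direction every iteration; B instead decomposes each segment geometrically into its diagonal prefix (a zip of two range objects) plus the axis-aligned remainder (a plain range along the longer axis) and bulk-inserts each piece with set.update, with no per-cell stepping or branching.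
import Mathlib
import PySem

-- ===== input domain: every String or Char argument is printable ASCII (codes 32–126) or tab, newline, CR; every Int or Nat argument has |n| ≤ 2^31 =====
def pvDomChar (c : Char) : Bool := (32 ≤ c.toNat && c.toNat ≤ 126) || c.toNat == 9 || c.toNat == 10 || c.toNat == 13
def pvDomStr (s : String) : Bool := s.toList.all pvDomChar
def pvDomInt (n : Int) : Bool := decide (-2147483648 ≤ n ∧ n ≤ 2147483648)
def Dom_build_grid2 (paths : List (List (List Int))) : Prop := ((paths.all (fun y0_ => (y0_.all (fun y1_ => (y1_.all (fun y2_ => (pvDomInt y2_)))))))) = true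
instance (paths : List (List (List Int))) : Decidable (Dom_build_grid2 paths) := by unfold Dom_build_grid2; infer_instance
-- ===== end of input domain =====

-- B replaces A's per-cell while-walk (mutating the current point, re-testing both coordinates and
-- recomputing the step direction each cell) by a geometric decomposition of each segment into its
-- diagonal prefix (zip of two ranges) plus the axis-aligned remainder, bulk-inserted with set.update
-- (objective: alternative algorithm of the same cost; no speed claim).

-- ===== PORT A =====
-- A's list comprehension [[point[1], point[0]] for point in path], as a named helper
def pvNormA (point : List Int) : Int × Int :=
  (PySem.List.pyGetD point 1 0, PySem.List.pyGetD point 0 0)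

-- A's inner `while not starting_point == next_point` loop; the fuel argument only makes the loop
-- total (A's loop runs exactly max(|deltaRow|,|deltaCol|) iterations, which is the fuel supplied).
-- `int(deltaRow / abs(deltaRow))` is ported as `deltaRow / |deltaRow|`: that division is exact
-- (result ±1), so Python's float division followed by int() equals Lean's integer division here.
def pvWalkA : Nat → (Int × Int) → (Int × Int) → Int → Int → PySem.Set (Int × Int) →
    (Int × Int) × PySem.Set (Int × Int)
  | 0, cur, _, _, _, acc => (cur, acc)
  | f+1, cur, nxt, dR, dC, acc =>
    if cur = nxt then (cur, acc)
    else
      let acc' := PySem.Set.add acc cur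
      let r := if cur.1 ≠ nxt.1 then cur.1 + dR / |dR| else cur.1
      let c := if cur.2 ≠ nxt.2 then cur.2 + dC / |dC| else cur.2
      pvWalkA f (r, c) nxt dR dC acc'

-- one iteration of A's `for idx in range(1, len(path))` body: state = (starting_point, blockers)
def pvSegA (st : (Int × Int) × PySem.Set (Int × Int)) (nxt : Int × Int) :
    (Int × Int) × PySem.Set (Int × Int) :=
  let dR := nxt.1 - st.1.1
  let dC := nxt.2 - st.1.2
  let w := pvWalkA ((max |dR| |dC|).toNat) st.1 nxt dR dC st.2
  (nxt, PySem.Set.add w.2 w.1)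

def build_grid2 (paths : List (List (List Int))) : (List (Int × Int)) × Int :=
  let maxY := ((PySem.List.max?
      ((paths.map (fun path => path.map (fun point => PySem.List.pyGetD point 1 0))).foldl (· ++ ·) [])
      (fun y => y)).getD 0) + 2
  let normalized := paths.map (fun path => path.map pvNormA)
  let blockers := normalized.foldl (fun bl path =>
    ((PySem.List.pyRange 1 (path.length : Int) 1).foldl
      (fun st idx => pvSegA st (PySem.List.pyGetD path idx ((0 : Int), (0 : Int))))
      (PySem.List.pyGetD path 0 ((0 : Int), (0 : Int)), bl)).2) PySem.Set.empty
  (blockers, maxY)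

-- ===== PORT B =====
-- B's per-segment body after unpacking r0, c0, r1, c1: diagonal prefix as a zip of two ranges,
-- then the axis-aligned remainder along each axis (one of the two is a no-op singleton);
-- each Python `blockers.update(iterable)` is the corresponding foldl of Set.add.
def pvCellsB (acc : PySem.Set (Int × Int)) (r0 c0 r1 c1 : Int) : PySem.Set (Int × Int) :=
  let sr : Int := if r0 ≤ r1 then 1 else -1
  let sc : Int := if c0 ≤ c1 then 1 else -1
  let m := min |r1 - r0| |c1 - c0|
  let acc1 := ((PySem.List.pyRange r0 (r0 + sr * (m + 1)) sr).zip
      (PySem.List.pyRange c0 (c0 + sc * (m + 1)) sc)).foldl PySem.Set.add acc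
  let rd := r0 + sr * m
  let cd := c0 + sc * m
  let acc2 := (PySem.List.pyRange rd (r1 + sr) sr).foldl (fun s r => PySem.Set.add s (r, cd)) acc1
  (PySem.List.pyRange cd (c1 + sc) sc).foldl (fun s c => PySem.Set.add s (rd, c)) acc2

-- one `for a, b in zip(path, path[1:])` iteration: unpack a[1], a[0], b[1], b[0]
def pvSegB (acc : PySem.Set (Int × Int)) (ab : List Int × List Int) : PySem.Set (Int × Int) :=
  pvCellsB acc (PySem.List.pyGetD ab.1 1 0) (PySem.List.pyGetD ab.1 0 0)
    (PySem.List.pyGetD ab.2 1 0) (PySem.List.pyGetD ab.2 0 0)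

def build_grid2_alt (paths : List (List (List Int))) : (List (Int × Int)) × Int :=
  let maxY := ((PySem.List.max?
      ((paths.map (fun path => path.map (fun p => PySem.List.pyGetD p 1 0))).flatten)
      (fun y => y)).getD 0) + 2
  let blockers := paths.foldl (fun acc path => (path.zip path.tail).foldl pvSegB acc)
    PySem.Set.empty
  (blockers, maxY)

-- ===== PRECONDITION & SPEC =====
-- Pre_ excludes exactly the inputs where Python A raises: an empty paths list or an empty path
-- (ValueError from max of an empty sequence / IndexError from path[0]) and points shorter than 2
-- (IndexError from point[1]).
def Pre_build_grid2 (paths : List (List (List Int))) : Prop :=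
  paths ≠ [] ∧ ∀ path ∈ paths, path ≠ [] ∧ ∀ point ∈ path, 2 ≤ point.length
instance (paths : List (List (List Int))) : Decidable (Pre_build_grid2 paths) := by
  unfold Pre_build_grid2; infer_instance
def pvWitness_build_grid2 : List (List (List Int)) := [[[0, 0], [2, 1]]]

def Spec_build_grid2 (paths : List (List (List Int))) (out : (List (Int × Int)) × Int) : Prop :=
  out = build_grid2_alt paths
instance (paths : List (List (List Int))) (out : (List (Int × Int)) × Int) :
    Decidable (Spec_build_grid2 paths out) := by unfold Spec_build_grid2; infer_instance

-- ===== CLAIM (what is proved, stated in full; the proofs are below) =====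
def Claim_equal_build_grid2 : Prop := ∀ (paths : List (List (List Int))),
  Dom_build_grid2 paths → Pre_build_grid2 paths → Spec_build_grid2 paths (build_grid2 paths)

-- ===== LEMMAS AND PROOFS =====

-- the cell A's clamped walk occupies after t steps (proof-only abbreviation)
def pvG (r0 c0 r1 c1 t : Int) : Int × Int :=
  (r0 + (r1 - r0).sign * min t |r1 - r0|, c0 + (c1 - c0).sign * min t |c1 - c0|)

lemma pvDivAbs (d : Int) (h : d ≠ 0) : d / |d| = d.sign := by
  rcases lt_or_gt_of_ne h with h1 | h1
  · rw [abs_of_neg h1, Int.ediv_neg, Int.ediv_self (by omega), Int.sign_eq_neg_one_of_neg h1]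
  · rw [abs_of_pos h1, Int.ediv_self (by omega), Int.sign_eq_one_of_pos h1]

-- the cell A's walk occupies after t steps of a segment differs from the endpoint while t < |delta|
lemma pvCell_ne (s1 n1 t : Int) (h0 : 0 ≤ t) (ht : t < |n1 - s1|) :
    s1 + (n1 - s1).sign * min t |n1 - s1| ≠ n1 := by
  have hd : n1 - s1 ≠ 0 := by intro h; rw [h] at ht; simp at ht; omega
  have hmin : min t |n1 - s1| = t := min_eq_left (le_of_lt ht)
  rw [hmin]
  intro hEq
  have : (n1 - s1).sign * t = (n1 - s1).sign * |n1 - s1| := by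
    rw [Int.sign_mul_abs]; omega
  have hs : (n1 - s1).sign ≠ 0 := by simp [Int.sign_eq_zero_iff_zero]; exact hd
  have := mul_left_cancel₀ hs this
  omega

-- one conditional coordinate step of A's walk advances the clamped formula by one
lemma pvStep (s1 n1 t : Int) (h0 : 0 ≤ t) :
    (if s1 + (n1 - s1).sign * min t |n1 - s1| ≠ n1
      then s1 + (n1 - s1).sign * min t |n1 - s1| + (n1 - s1) / |n1 - s1|
      else s1 + (n1 - s1).sign * min t |n1 - s1|)
    = s1 + (n1 - s1).sign * min (t + 1) |n1 - s1| := by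
  by_cases ht : t < |n1 - s1|
  · have hd : n1 - s1 ≠ 0 := by intro h; rw [h] at ht; simp at ht; omega
    rw [if_pos (pvCell_ne s1 n1 t h0 ht), pvDivAbs _ hd,
      min_eq_left (le_of_lt ht), min_eq_left (by omega)]
    ring
  · rw [not_lt] at ht
    have h1 : min t |n1 - s1| = |n1 - s1| := min_eq_right ht
    have h2 : min (t + 1) |n1 - s1| = |n1 - s1| := min_eq_right (by omega)
    rw [h1, h2, if_neg]
    simp [Int.sign_mul_abs]

-- A's walk from the cell after t steps performs exactly the clamped adds for t, t+1, …, steps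
lemma pvWalk_eq (s1 s2 n1 n2 : Int) (k : Nat) :
    ∀ (t : Int) (f : Nat) (acc : PySem.Set (Int × Int)),
      0 ≤ t → t + (k : Int) = max |n1 - s1| |n2 - s2| → k ≤ f →
      PySem.Set.add
        (pvWalkA f (s1 + (n1 - s1).sign * min t |n1 - s1|,
                    s2 + (n2 - s2).sign * min t |n2 - s2|) (n1, n2) (n1 - s1) (n2 - s2) acc).2
        (pvWalkA f (s1 + (n1 - s1).sign * min t |n1 - s1|,
                    s2 + (n2 - s2).sign * min t |n2 - s2|) (n1, n2) (n1 - s1) (n2 - s2) acc).1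
      = (PySem.List.pyRange t (max |n1 - s1| |n2 - s2| + 1) 1).foldl
          (fun a u => PySem.Set.add a (pvG s1 s2 n1 n2 u)) acc := by
  induction k with
  | zero =>
    intro t f acc h0 hsum hf
    have ht : t = max |n1 - s1| |n2 - s2| := by push_cast at hsum; omega
    have hc1 : min t |n1 - s1| = |n1 - s1| := min_eq_right (by rw [ht]; exact le_max_left _ _)
    have hc2 : min t |n2 - s2| = |n2 - s2| := min_eq_right (by rw [ht]; exact le_max_right _ _)
    have hcell : (s1 + (n1 - s1).sign * min t |n1 - s1|,
        s2 + (n2 - s2).sign * min t |n2 - s2|) = ((n1 : Int), (n2 : Int)) := by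
      rw [hc1, hc2, Int.sign_mul_abs, Int.sign_mul_abs]; simp
    rw [← ht, PySem.List.pyRange_one_singleton, List.foldl_cons, List.foldl_nil]
    unfold pvG
    rw [hcell]
    cases f <;> simp [pvWalkA]
  | succ k ih =>
    intro t f acc h0 hsum hf
    have htK : t < max |n1 - s1| |n2 - s2| := by push_cast at hsum; omega
    cases f with
    | zero => omega
    | succ f' =>
      have hne : (s1 + (n1 - s1).sign * min t |n1 - s1|,
          s2 + (n2 - s2).sign * min t |n2 - s2|) ≠ ((n1 : Int), (n2 : Int)) := by
        rcases lt_max_iff.mp htK with h | h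
        · exact fun hEq => pvCell_ne s1 n1 t h0 h (congrArg Prod.fst hEq)
        · exact fun hEq => pvCell_ne s2 n2 t h0 h (congrArg Prod.snd hEq)
      rw [PySem.List.pyRange_one_cons (by omega), List.foldl_cons]
      simp only [pvWalkA, if_neg hne]
      rw [pvStep s1 n1 t h0, pvStep s2 n2 t h0]
      have := ih (t + 1) f' (PySem.Set.add acc (pvG s1 s2 n1 n2 t)) (by omega)
        (by push_cast at hsum ⊢; omega) (by omega)
      unfold pvG at this ⊢
      exact this

-- range with a ±1 step and a nonnegative count, as a map over List.range
lemma pvRangeSigned (a s n : Int) (hs : s = 1 ∨ s = -1) (_hn : 0 ≤ n) :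
    PySem.List.pyRange a (a + s * n) s
      = (List.range n.toNat).map (fun (k : Nat) => a + s * (k : Int)) := by
  rcases hs with rfl | rfl
  · rw [show a + 1 * n = a + n from by ring, PySem.List.pyRange_one,
      show a + n - a = n from by ring]
    exact List.map_congr_left (fun k _ => by ring)
  · rw [show a + -1 * n = a - n from by ring, PySem.List.pyRange_neg_one,
      show a - (a - n) = n from by ring]
    exact List.map_congr_left (fun k _ => by ring)

-- B's three per-segment bulk inserts perform exactly the clamped adds for t = 0 … steps
lemma pvCellsCore (acc : PySem.Set (Int × Int)) (r0 c0 r1 c1 sr sc : Int)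
    (hsr : sr = 1 ∨ sr = -1) (hsc : sc = 1 ∨ sc = -1)
    (hr1 : r1 = r0 + sr * |r1 - r0|) (hc1 : c1 = c0 + sc * |c1 - c0|)
    (hsrt : ∀ t : Int, 0 ≤ t → t ≤ |r1 - r0| → sr * t = (r1 - r0).sign * t)
    (hsct : ∀ t : Int, 0 ≤ t → t ≤ |c1 - c0| → sc * t = (c1 - c0).sign * t) :
    (PySem.List.pyRange (c0 + sc * min |r1 - r0| |c1 - c0|) (c1 + sc) sc).foldl
      (fun s c => PySem.Set.add s (r0 + sr * min |r1 - r0| |c1 - c0|, c))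
      ((PySem.List.pyRange (r0 + sr * min |r1 - r0| |c1 - c0|) (r1 + sr) sr).foldl
        (fun s r => PySem.Set.add s (r, c0 + sc * min |r1 - r0| |c1 - c0|))
        (((PySem.List.pyRange r0 (r0 + sr * (min |r1 - r0| |c1 - c0| + 1)) sr).zip
            (PySem.List.pyRange c0 (c0 + sc * (min |r1 - r0| |c1 - c0| + 1)) sc)).foldl
          PySem.Set.add acc))
    = (PySem.List.pyRange 0 (max |r1 - r0| |c1 - c0| + 1) 1).foldl
        (fun s t => PySem.Set.add s (pvG r0 c0 r1 c1 t)) acc := by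
  set aR := |r1 - r0| with haR
  set aC := |c1 - c0| with haC
  have haR0 : 0 ≤ aR := abs_nonneg _
  have haC0 : 0 ≤ aC := abs_nonneg _
  set m := min aR aC with hm
  set K := max aR aC with hK
  have hm0 : 0 ≤ m := le_min haR0 haC0
  have hmR : m ≤ aR := min_le_left _ _
  have hmC : m ≤ aC := min_le_right _ _
  have hRK : aR ≤ K := le_max_left _ _
  have hCK : aC ≤ K := le_max_right _ _
  -- pointwise descriptions of the clamped cell
  have hGd : ∀ k : Nat, (k : Int) ≤ m → pvG r0 c0 r1 c1 k = (r0 + sr * k, c0 + sc * k) := by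
    intro k hk
    unfold pvG
    rw [← haR, ← haC, min_eq_left (le_trans hk hmR), min_eq_left (le_trans hk hmC),
      ← hsrt k (by positivity) (le_trans hk hmR), ← hsct k (by positivity) (le_trans hk hmC)]
  have hGrow : aC ≤ aR → ∀ k : Nat, (k : Int) ≤ aR - m →
      pvG r0 c0 r1 c1 (m + k) = (r0 + sr * m + sr * k, c0 + sc * m) := by
    intro hc k hk
    have hma : m = aC := min_eq_right hc
    unfold pvG
    rw [← haR, ← haC, min_eq_left (by omega), min_eq_right (by omega),
      ← hsrt (m + k) (by positivity) (by omega), ← hsct aC haC0 le_rfl, ← hma]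
    simp only [Prod.mk.injEq]
    exact ⟨by ring, trivial⟩
  have hGcol : aR ≤ aC → ∀ k : Nat, (k : Int) ≤ aC - m →
      pvG r0 c0 r1 c1 (m + k) = (r0 + sr * m, c0 + sc * m + sc * k) := by
    intro hc k hk
    have hma : m = aR := min_eq_left hc
    unfold pvG
    rw [← haR, ← haC, min_eq_right (by omega), min_eq_left (by omega),
      ← hsct (m + k) (by positivity) (by omega), ← hsrt aR haR0 le_rfl, ← hma]
    simp only [Prod.mk.injEq]
    exact ⟨trivial, by ring⟩
  have hGm : pvG r0 c0 r1 c1 m = (r0 + sr * m, c0 + sc * m) := by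
    have := hGd m.toNat (by omega)
    rwa [Int.toNat_of_nonneg hm0] at this
  -- rewrite all four B-side ranges as maps over List.range
  rw [show r1 + sr = (r0 + sr * m) + sr * (aR - m + 1) from by rw [hr1]; ring,
      show c1 + sc = (c0 + sc * m) + sc * (aC - m + 1) from by rw [hc1]; ring,
      pvRangeSigned r0 sr (m + 1) hsr (by omega),
      pvRangeSigned c0 sc (m + 1) hsc (by omega),
      pvRangeSigned (r0 + sr * m) sr (aR - m + 1) hsr (by omega),
      pvRangeSigned (c0 + sc * m) sc (aC - m + 1) hsc (by omega),
      List.zip_map']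
  -- rewrite the clamped range as two maps over List.range
  have e1 : PySem.List.pyRange 0 (m + 1) 1
      = (List.range (m + 1).toNat).map (fun (k : Nat) => (0 : Int) + 1 * (k : Int)) := by
    have := pvRangeSigned 0 1 (m + 1) (Or.inl rfl) (by omega)
    rwa [show (0 : Int) + 1 * (m + 1) = m + 1 from by ring] at this
  have e2 : PySem.List.pyRange (m + 1) (K + 1) 1
      = (List.range (K - m).toNat).map (fun (k : Nat) => (m + 1) + 1 * (k : Int)) := by
    have := pvRangeSigned (m + 1) 1 (K - m) (Or.inl rfl) (by omega)
    rwa [show m + 1 + 1 * (K - m) = K + 1 from by ring] at this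
  rw [PySem.List.pyRange_one_append 0 (m + 1) (K + 1) (by omega) (by omega),
      List.foldl_append, e1, e2]
  simp only [List.foldl_map]
  -- the diagonal prefix is the first m+1 clamped cells
  rw [PySem.List.foldl_congr_mem (List.range (m + 1).toNat)
      (fun s (k : Nat) => PySem.Set.add s (r0 + sr * (k : Int), c0 + sc * (k : Int)))
      (fun s (k : Nat) => PySem.Set.add s (pvG r0 c0 r1 c1 ((0 : Int) + 1 * (k : Int)))) acc
      (by
        intro s k hk
        rw [List.mem_range] at hk
        dsimp only
        rw [show (0 : Int) + 1 * (k : Int) = (k : Int) from by ring, hGd k (by omega)])]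
  have hS1mem : pvG r0 c0 r1 c1 m ∈ (List.range (m + 1).toNat).foldl
      (fun s (k : Nat) => PySem.Set.add s (pvG r0 c0 r1 c1 ((0 : Int) + 1 * (k : Int)))) acc := by
    apply (PySem.Set.mem_foldl_add _ _ _ _).mpr
    exact Or.inr ⟨m.toNat, List.mem_range.mpr (by omega),
      by rw [show (0 : Int) + 1 * (m.toNat : Int) = (m.toNat : Int) from by ring,
        Int.toNat_of_nonneg hm0]⟩
  set S1 := (List.range (m + 1).toNat).foldl
      (fun s (k : Nat) => PySem.Set.add s (pvG r0 c0 r1 c1 ((0 : Int) + 1 * (k : Int)))) acc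
      with hS1def
  rcases le_total aC aR with hc | hc
  · -- the row remainder carries the clamped cells m … K; the column remainder is a no-op
    have hKa : K = aR := max_eq_left hc
    have hma : m = aC := min_eq_right hc
    rw [show (aR - m + 1).toNat = (K - m).toNat + 1 from by omega,
        List.range_succ_eq_map, List.foldl_cons]
    rw [show PySem.Set.add S1 (r0 + sr * m + sr * ((0 : Nat) : Int), c0 + sc * m) = S1 from by
        rw [show r0 + sr * m + sr * ((0 : Nat) : Int) = r0 + sr * m from by push_cast; ring, ← hGm]
        exact PySem.Set.add_of_mem hS1mem]
    simp only [List.foldl_map]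
    rw [PySem.List.foldl_congr_mem (List.range (K - m).toNat)
        (fun s (k : Nat) => PySem.Set.add s (r0 + sr * m + sr * ((k.succ : Nat) : Int), c0 + sc * m))
        (fun s (k : Nat) => PySem.Set.add s (pvG r0 c0 r1 c1 (m + 1 + 1 * (k : Int)))) S1
        (by
          intro s k hk
          rw [List.mem_range] at hk
          dsimp only
          rw [show m + 1 + 1 * (k : Int) = m + ((k + 1 : Nat) : Int) from by push_cast; ring,
            hGrow hc (k + 1) (by push_cast; omega)])]
    rw [show (aC - m + 1).toNat = 1 from by omega, List.range_one, List.foldl_cons, List.foldl_nil]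
    have hmem2 : pvG r0 c0 r1 c1 m ∈ List.foldl
        (fun s (k : Nat) => PySem.Set.add s (pvG r0 c0 r1 c1 (m + 1 + 1 * (k : Int)))) S1
        (List.range (K - m).toNat) :=
      (PySem.Set.mem_foldl_add _ _ _ _).mpr (Or.inl hS1mem)
    rw [show c0 + sc * m + sc * ((0 : Nat) : Int) = c0 + sc * m from by push_cast; ring, ← hGm]
    exact PySem.Set.add_of_mem hmem2
  · -- the row remainder is a no-op singleton; the column remainder carries the cells m … K
    have hKa : K = aC := max_eq_right hc
    have hma : m = aR := min_eq_left hc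
    rw [show (aR - m + 1).toNat = 1 from by omega, List.range_one, List.foldl_cons, List.foldl_nil]
    rw [show PySem.Set.add S1 (r0 + sr * m + sr * ((0 : Nat) : Int), c0 + sc * m) = S1 from by
        rw [show r0 + sr * m + sr * ((0 : Nat) : Int) = r0 + sr * m from by push_cast; ring, ← hGm]
        exact PySem.Set.add_of_mem hS1mem]
    rw [show (aC - m + 1).toNat = (K - m).toNat + 1 from by omega,
        List.range_succ_eq_map, List.foldl_cons]
    rw [show PySem.Set.add S1 (r0 + sr * m, c0 + sc * m + sc * ((0 : Nat) : Int)) = S1 from by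
        rw [show c0 + sc * m + sc * ((0 : Nat) : Int) = c0 + sc * m from by push_cast; ring, ← hGm]
        exact PySem.Set.add_of_mem hS1mem]
    simp only [List.foldl_map]
    rw [PySem.List.foldl_congr_mem (List.range (K - m).toNat)
        (fun s (k : Nat) => PySem.Set.add s (r0 + sr * m, c0 + sc * m + sc * ((k.succ : Nat) : Int)))
        (fun s (k : Nat) => PySem.Set.add s (pvG r0 c0 r1 c1 (m + 1 + 1 * (k : Int)))) S1
        (by
          intro s k hk
          rw [List.mem_range] at hk
          dsimp only
          rw [show m + 1 + 1 * (k : Int) = m + ((k + 1 : Nat) : Int) from by push_cast; ring,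
            hGcol hc (k + 1) (by push_cast; omega)])]

-- the three facts pvCellsCore needs about B's computed step sign
lemma pvSrHyp (x y : Int) :
    (if x ≤ y then (1 : Int) else -1) = 1 ∨ (if x ≤ y then (1 : Int) else -1) = -1 := by
  split_ifs <;> simp

lemma pvSrEnd (x y : Int) : y = x + (if x ≤ y then (1 : Int) else -1) * |y - x| := by
  split_ifs with h
  · rw [abs_of_nonneg (by omega : (0 : Int) ≤ y - x)]; ring
  · rw [abs_of_neg (by omega : y - x < 0)]; ring

lemma pvSrMul (x y t : Int) (h0 : 0 ≤ t) (ht : t ≤ |y - x|) :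
    (if x ≤ y then (1 : Int) else -1) * t = (y - x).sign * t := by
  rcases lt_trichotomy x y with h | h | h
  · rw [if_pos (le_of_lt h), Int.sign_eq_one_of_pos (by omega)]
  · subst h
    simp only [sub_self, abs_zero] at ht
    have ht0 : t = 0 := le_antisymm ht h0
    subst ht0
    simp
  · rw [if_neg (by omega), Int.sign_eq_neg_one_of_neg (by omega)]

-- A's whole per-segment walk produces exactly B's three bulk inserts (coordinate level)
lemma pvCells_eq (acc : PySem.Set (Int × Int)) (r0 c0 r1 c1 : Int) :
    PySem.Set.add
      (pvWalkA ((max |r1 - r0| |c1 - c0|).toNat) (r0, c0) (r1, c1) (r1 - r0) (c1 - c0) acc).2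
      (pvWalkA ((max |r1 - r0| |c1 - c0|).toNat) (r0, c0) (r1, c1) (r1 - r0) (c1 - c0) acc).1
    = pvCellsB acc r0 c0 r1 c1 := by
  have hK : (0 : Int) ≤ max |r1 - r0| |c1 - c0| := le_trans (abs_nonneg _) (le_max_left _ _)
  have h := pvWalk_eq r0 c0 r1 c1 ((max |r1 - r0| |c1 - c0|).toNat) 0
    ((max |r1 - r0| |c1 - c0|).toNat) acc le_rfl (by rw [Int.toNat_of_nonneg hK]; ring) le_rfl
  rw [min_eq_left (abs_nonneg _), min_eq_left (abs_nonneg _)] at h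
  simp only [mul_zero, add_zero] at h
  simp only [pvCellsB]
  rw [pvCellsCore acc r0 c0 r1 c1 (if r0 ≤ r1 then 1 else -1) (if c0 ≤ c1 then 1 else -1)
    (pvSrHyp r0 r1) (pvSrHyp c0 c1) (pvSrEnd r0 r1) (pvSrEnd c0 c1)
    (pvSrMul r0 r1) (pvSrMul c0 c1)]
  exact h

-- one iteration of A's segment loop produces exactly B's per-segment inserts
lemma pvSeg_eq (bl : PySem.Set (Int × Int)) (a b : List Int) :
    (pvSegA (pvNormA a, bl) (pvNormA b)).2 = pvSegB bl (a, b) := by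
  unfold pvSegA pvSegB pvNormA
  dsimp only
  exact pvCells_eq bl (PySem.List.pyGetD a 1 0) (PySem.List.pyGetD a 0 0)
    (PySem.List.pyGetD b 1 0) (PySem.List.pyGetD b 0 0)

-- A's fold over the remaining normalized points equals B's fold over consecutive raw pairs
lemma pvPath_eq : ∀ (rest : List (List Int)) (p : List Int) (bl : PySem.Set (Int × Int)),
    ((rest.map pvNormA).foldl pvSegA (pvNormA p, bl)).2
      = ((p :: rest).zip rest).foldl pvSegB bl := by
  intro rest
  induction rest with
  | nil => intro p bl; rfl
  | cons b rest ih =>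
    intro p bl
    simp only [List.map_cons, List.foldl_cons, List.zip_cons_cons]
    have h1 : pvSegA (pvNormA p, bl) (pvNormA b) = (pvNormA b, pvSegB bl (p, b)) := by
      rw [← pvSeg_eq bl p b]
      rfl
    rw [h1]
    exact ih b (pvSegB bl (p, b))

lemma pv_main (paths : List (List (List Int))) : build_grid2 paths = build_grid2_alt paths := by
  unfold build_grid2 build_grid2_alt
  simp only [PySem.List.foldl_append_eq_flatten]
  simp only [List.nil_append, List.foldl_map]
  have hfun : ∀ (bl : PySem.Set (Int × Int)) (path : List (List Int)),
      ((PySem.List.pyRange 1 (((path.map pvNormA)).length : Int) 1).foldl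
        (fun st idx => pvSegA st (PySem.List.pyGetD (path.map pvNormA) idx ((0 : Int), (0 : Int))))
        (PySem.List.pyGetD (path.map pvNormA) 0 ((0 : Int), (0 : Int)), bl)).2
      = (path.zip path.tail).foldl pvSegB bl := by
    intro bl path
    rw [PySem.List.foldl_pyRange_pyGetD' (path.map pvNormA) ((0 : Int), (0 : Int)) pvSegA _ (by norm_num)]
    cases path with
    | nil => rfl
    | cons p rest =>
      simp only [List.map_cons, PySem.List.pyGetD_ofNat', List.getD_cons_zero, List.tail_cons]
      exact pvPath_eq rest p bl
  simp only [hfun]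

-- ===== VERDICT (by name: the statement is the Claim_ definition above) =====
theorem build_grid2_spec : Claim_equal_build_grid2 := by
  intro paths _ _
  exact pv_main paths
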